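-- pv_equiv track=rewrite | github.com/thomas-hennessy-work/python-assessment | Assessment1/Code/python1.py | six
-- ===== SOURCE A (Python) =====
-- def six(input):
--
-- 	stored_letter1 = ""
-- 	stored_letter2 = ""
--
-- 	for letter in input:
-- 		if stored_letter1 == "" and (letter == "i" or letter == "e" or letter == "c"):
-- 			stored_letter1 = letter
-- 		elif stored_letter1 == "i" and letter == "e":
-- 			return True
-- 		elif stored_letter1 == "c" and letter == "e":
-- 			stored_letter2 = letter
-- 		elif stored_letter1 == "c" and stored_letter2 == "e" and letter == "i":
-- 			return True
-- 		elif letter == "i" or letter == "e" or letter == "c":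
-- 			stored_letter1 = letter
-- 			stored_letter2 =""
-- 		else:
-- 			stored_letter1 = ""
-- 			stored_letter2 =""
--
-- 	return False
-- ===== SOURCE B (Python) =====
-- import re
--
-- _PAT = re.compile(r"ie|ce+i")
--
-- def six(input):
--     return _PAT.search(input) is not None
-- ===== Notes on version B (the rewrite author's own statement) =====
-- stated objective: faster
-- what changed: Replaced the hand-rolled two-variable state machine (with its five-way branch chain per character) by a single compiled-regex search matching the two accept paths of the DFA: a consecutive i-then-e, or a c followed by one or more e's then i.
import Mathlib
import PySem

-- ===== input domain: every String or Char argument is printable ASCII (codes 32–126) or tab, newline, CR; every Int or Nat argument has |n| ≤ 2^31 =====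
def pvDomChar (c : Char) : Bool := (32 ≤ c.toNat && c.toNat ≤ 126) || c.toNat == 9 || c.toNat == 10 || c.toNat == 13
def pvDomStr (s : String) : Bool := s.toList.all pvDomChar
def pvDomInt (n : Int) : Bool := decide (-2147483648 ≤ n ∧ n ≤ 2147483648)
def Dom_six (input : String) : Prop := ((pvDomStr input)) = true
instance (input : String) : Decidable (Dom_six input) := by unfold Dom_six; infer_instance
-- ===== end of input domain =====

-- B replaces A's explicit two-variable state machine by a regex-style search for 'ie|ce+i' (idiomatic rewrite; same O(n) cost).

-- ===== PORT A =====
-- literal port of A's loop: stored_letter1/stored_letter2 kept as Strings, early `return True` = returning true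
def sixLoop (s1 s2 : String) : List Char → Bool
  | [] => false
  | c :: rest =>
    if s1 = "" ∧ (c = 'i' ∨ c = 'e' ∨ c = 'c') then sixLoop (String.ofList [c]) s2 rest
    else if s1 = "i" ∧ c = 'e' then true
    else if s1 = "c" ∧ c = 'e' then sixLoop s1 (String.ofList [c]) rest
    else if s1 = "c" ∧ s2 = "e" ∧ c = 'i' then true
    else if c = 'i' ∨ c = 'e' ∨ c = 'c' then sixLoop (String.ofList [c]) "" rest
    else sixLoop "" "" rest

def six (input : String) : Bool := sixLoop "" "" input.toList

-- ===== PORT B =====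
-- B is `re.search(r"ie|ce+i", input) is not None`; regex ported by hand, exact on all strings:
-- headE = the rest starts with 'e'; estar = prefix matches e*i; eplus = prefix matches e+i;
-- matchAtB = the alternation 'ie|ce+i' matches at this position; searchB tries each position
-- left to right like re.search.
def headE : List Char → Bool
  | [] => false
  | c :: _ => c = 'e'

def estar : List Char → Bool
  | [] => false
  | c :: r => if c = 'i' then true else if c = 'e' then estar r else false

def eplus : List Char → Bool
  | [] => false
  | c :: r => if c = 'e' then estar r else false

def matchAtB : List Char → Bool
  | [] => false
  | c :: r => (if c = 'i' then headE r else false) || (if c = 'c' then eplus r else false)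

def searchB : List Char → Bool
  | [] => false
  | c :: r => matchAtB (c :: r) || searchB r

def six_alt (input : String) : Bool := searchB input.toList

-- ===== PRECONDITION & SPEC =====
def Spec_six (input : String) (out : Bool) : Prop := out = six_alt input
instance (input : String) (out : Bool) : Decidable (Spec_six input out) := by unfold Spec_six; infer_instance

-- ===== CLAIM (what is proved, stated in full; the proofs are below) =====
def Claim_equal_six : Prop := ∀ (input : String), Dom_six input → Spec_six input (six input)

-- ===== LEMMAS AND PROOFS =====

theorem ofList_i : String.ofList ['i'] = "i" := rfl
theorem ofList_e : String.ofList ['e'] = "e" := rfl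
theorem ofList_c : String.ofList ['c'] = "c" := rfl

-- invariant: A's DFA, run from each reachable state, equals B's regex search plus the pending partial match
theorem loop_inv (l : List Char) :
    sixLoop "" "" l = searchB l ∧
    sixLoop "e" "" l = searchB l ∧
    sixLoop "i" "" l = (searchB l || headE l) ∧
    sixLoop "c" "" l = (searchB l || eplus l) ∧
    sixLoop "c" "e" l = (searchB l || estar l) := by
  induction l with
  | nil => simp [sixLoop, searchB, headE, eplus, estar]
  | cons c r ih =>
    obtain ⟨ih0, ihe, ihi, ihc, ihce⟩ := ih
    by_cases hi : c = 'i'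
    · subst hi
      simp [sixLoop, searchB, matchAtB, headE, eplus, estar, ofList_i, ih0, ihi] <;>
        cases searchB r <;> cases headE r <;> simp
    · by_cases he : c = 'e'
      · subst he
        simp [sixLoop, searchB, matchAtB, headE, eplus, estar, ofList_e,
              ihe, ihce]
      · by_cases hc : c = 'c'
        · subst hc
          simp [sixLoop, searchB, matchAtB, headE, eplus, estar, ofList_c, hi, he, ih0, ihc] <;>
            cases searchB r <;> cases eplus r <;> simp
        · simp [sixLoop, searchB, matchAtB, headE, eplus, estar, hi, he, hc, ih0]

-- ===== VERDICT (by name: the statement is the Claim_ definition above) =====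
theorem six_spec : Claim_equal_six := by
  intro input _
  unfold Spec_six six six_alt
  exact (loop_inv input.toList).1
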